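-- pv_equiv track=rewrite | github.com/MrBrantCode/unitest_baseline | mut_generate/mist_train_cf/cf_50761/solution.py | max_uppercase_run
-- ===== SOURCE A (Python) =====
-- def max_uppercase_run(s):
--     max_len = 0
--     max_start = 0
--     max_end = 0
--
--     current_len = 0
--     start = 0
--     for i in range(len(s)):
--         if s[i].isupper():
--             if current_len == 0:
--                 start = i
--             current_len = current_len + 1
--             if current_len > max_len:
--                 max_len = current_len
--                 max_start = start
--                 max_end = i
--         else:
--             current_len = 0
--
--     return max_start, max_end
-- ===== SOURCE B (Python) =====
-- def max_uppercase_run(s):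
--     # Runs decomposition: skip over each maximal uppercase block with an inner
--     # scan instead of a per-character state machine.
--     n = len(s)
--     best_len, best_start, best_end = 0, 0, 0
--     i = 0
--     while i < n:
--         if s[i].isupper():
--             j = i + 1
--             while j < n and s[j].isupper():
--                 j += 1
--             if j - i > best_len:
--                 best_len, best_start, best_end = j - i, i, j - 1
--             i = j
--         else:
--             i += 1
--     return best_start, best_end
-- ===== Notes on version B (the rewrite author's own statement) =====
-- stated objective: alternative
-- what changed: Replaced the per-character state machine (current_len/start carried across every index, with an incremental max update on each uppercase char) by a runs decomposition: an outer loop that skips each maximal uppercase block with an inner scan and compares the whole block's length against the best once.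
import Mathlib
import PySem

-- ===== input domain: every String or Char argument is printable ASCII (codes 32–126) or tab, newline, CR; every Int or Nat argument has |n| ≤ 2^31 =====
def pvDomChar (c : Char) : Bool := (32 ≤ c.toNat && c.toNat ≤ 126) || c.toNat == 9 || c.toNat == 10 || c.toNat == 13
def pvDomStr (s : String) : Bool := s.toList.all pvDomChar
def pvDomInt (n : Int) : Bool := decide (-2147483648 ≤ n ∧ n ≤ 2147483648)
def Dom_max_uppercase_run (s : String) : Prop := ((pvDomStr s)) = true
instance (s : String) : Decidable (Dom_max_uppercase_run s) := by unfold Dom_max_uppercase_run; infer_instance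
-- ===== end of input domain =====

-- B's objective: an alternative decomposition — maximal-run skipping instead of A's
-- per-character state machine; same O(n) cost, return value proved identical.

-- ===== PORT A =====
-- A's for-loop over range(len(s)) reading s[i]: the obvious structural recursion over
-- the character list carrying the index i and the loop state
-- (max_len, max_start, max_end, current_len, start).
def pvLoopA (cs : List Char) (i ml ms me cl st : Int) : Int × Int :=
  match cs with
  | [] => (ms, me)
  | c :: rest =>
    if PySem.Chars.isupper c then
      let st' := if cl = 0 then i else st
      let cl' := cl + 1
      if cl' > ml then pvLoopA rest (i+1) cl' st' i cl' st'
      else pvLoopA rest (i+1) ml ms me cl' st'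
    else pvLoopA rest (i+1) ml ms me 0 st

def max_uppercase_run (s : String) : Int × Int :=
  pvLoopA s.toList 0 0 0 0 0 0

-- ===== PORT B =====
-- inner while: advance j over uppercase characters; returns the remaining suffix and j
def pvSkipRun (cs : List Char) (j : Int) : List Char × Int :=
  match cs with
  | [] => ([], j)
  | c :: rest => if PySem.Chars.isupper c then pvSkipRun rest (j+1) else (c :: rest, j)

theorem pvSkipRun_length_le (cs : List Char) (j : Int) :
    (pvSkipRun cs j).1.length ≤ cs.length := by
  induction cs generalizing j with
  | nil => simp [pvSkipRun]
  | cons c rest ih =>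
    simp only [pvSkipRun]
    split
    · exact le_trans (ih (j+1)) (Nat.le_succ _)
    · exact le_refl _

-- outer while over the maximal uppercase blocks, state (best_len, best_start, best_end)
def pvLoopB (cs : List Char) (i bl bs be : Int) : Int × Int × Int :=
  match h : cs with
  | [] => (bl, bs, be)
  | c :: rest =>
    if PySem.Chars.isupper c then
      let p := pvSkipRun rest (i + 1)
      if p.2 - i > bl then pvLoopB p.1 p.2 (p.2 - i) i (p.2 - 1)
      else pvLoopB p.1 p.2 bl bs be
    else pvLoopB rest (i+1) bl bs be
  termination_by cs.length
  decreasing_by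
  · exact Nat.lt_succ_of_le (pvSkipRun_length_le rest (i+1))
  · exact Nat.lt_succ_of_le (pvSkipRun_length_le rest (i+1))
  · simp

def max_uppercase_run_alt (s : String) : Int × Int :=
  let b := pvLoopB s.toList 0 0 0 0
  (b.2.1, b.2.2)

-- ===== PRECONDITION & SPEC =====
def Spec_max_uppercase_run (s : String) (out : Int × Int) : Prop := out = max_uppercase_run_alt s
instance (s : String) (out : Int × Int) : Decidable (Spec_max_uppercase_run s out) := by unfold Spec_max_uppercase_run; infer_instance

-- ===== CLAIM (what is proved, stated in full; the proofs are below) =====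
def Claim_equal_max_uppercase_run : Prop := ∀ (s : String), Dom_max_uppercase_run s → Spec_max_uppercase_run s (max_uppercase_run s)

-- ===== LEMMAS AND PROOFS =====

-- the suffix returned by pvSkipRun starts with a non-uppercase character (if nonempty)
theorem pvSkipRun_head_not_upper (cs : List Char) (j : Int) (d : Char) (rest' : List Char)
    (h : (pvSkipRun cs j).1 = d :: rest') : PySem.Chars.isupper d = false := by
  induction cs generalizing j with
  | nil => simp [pvSkipRun] at h
  | cons e tl ih =>
    by_cases he : PySem.Chars.isupper e
    · rw [show pvSkipRun (e :: tl) j = pvSkipRun tl (j+1) by simp [pvSkipRun, he]] at h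
      exact ih (j+1) h
    · rw [show pvSkipRun (e :: tl) j = (e :: tl, j) by simp [pvSkipRun, he]] at h
      simp at h
      rw [← h.1]
      simpa using he

-- Mid-run invariant for A: while inside an uppercase run that started at position st
-- with best (ml, ms, me) at run entry, after cl ≥ 1 run characters A's best is
-- (if cl > ml then cl else ml, ...); running A to the end of the run (pvSkipRun)
-- keeps this shape with cl replaced by the full length so far, (pvSkipRun cs i).2 - st.
theorem pvLoopA_run (cs : List Char) (i ml ms me cl st : Int)
    (hcl : 0 < cl) (hi : i = st + cl) :
    pvLoopA cs i (if cl > ml then cl else ml) (if cl > ml then st else ms)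
      (if cl > ml then st + cl - 1 else me) cl st
    = pvLoopA (pvSkipRun cs i).1 (pvSkipRun cs i).2
        (if (pvSkipRun cs i).2 - st > ml then (pvSkipRun cs i).2 - st else ml)
        (if (pvSkipRun cs i).2 - st > ml then st else ms)
        (if (pvSkipRun cs i).2 - st > ml then (pvSkipRun cs i).2 - 1 else me)
        ((pvSkipRun cs i).2 - st) st := by
  induction cs generalizing i cl with
  | nil =>
    simp only [pvSkipRun]
    have h : i - st = cl := by omega
    simp only [h]
    have h2 : st + cl - 1 = i - 1 := by omega
    rw [h2]
  | cons c rest ih =>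
    by_cases hu : PySem.Chars.isupper c
    · rw [show pvSkipRun (c :: rest) i = pvSkipRun rest (i+1) by simp [pvSkipRun, hu]]
      rw [pvLoopA]
      simp only [hu, if_true]
      have hne : ¬ (cl = 0) := by omega
      simp only [hne, if_false]
      have step : (if cl + 1 > (if cl > ml then cl else ml) then
            pvLoopA rest (i+1) (cl+1) st i (cl+1) st
          else pvLoopA rest (i+1) (if cl > ml then cl else ml) (if cl > ml then st else ms)
            (if cl > ml then st + cl - 1 else me) (cl+1) st)
          = pvLoopA rest (i+1) (if cl + 1 > ml then cl + 1 else ml)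
              (if cl + 1 > ml then st else ms)
              (if cl + 1 > ml then st + (cl+1) - 1 else me) (cl+1) st := by
        by_cases h1 : cl > ml
        · have h2 : cl + 1 > ml := by omega
          simp only [h1, if_true, h2]
          have h3 : cl + 1 > cl := by omega
          simp only [h3, if_true]
          have h4 : st + (cl + 1) - 1 = i := by omega
          rw [h4]
        · simp only [h1, if_false]
          by_cases h2 : cl + 1 > ml
          · simp only [h2, if_true]
            have h4 : st + (cl + 1) - 1 = i := by omega
            rw [h4]
          · simp only [h2, if_false]
      rw [step]
      exact ih (i+1) (cl+1) (by omega) (by omega)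
    · rw [show pvSkipRun (c :: rest) i = (c :: rest, i) by simp [pvSkipRun, hu]]
      have h : i - st = cl := by omega
      simp only [h]
      have h2 : st + cl - 1 = i - 1 := by omega
      rw [h2]

-- Main invariant: with current_len = 0 (between runs), A's loop equals B's loop on the
-- same best triple, for any leftover value of A's `start`.
theorem pvLoopA_eq_loopB (n : Nat) (cs : List Char) (hn : cs.length <= n)
    (i ml ms me st : Int) :
    pvLoopA cs i ml ms me 0 st = ((pvLoopB cs i ml ms me).2.1, (pvLoopB cs i ml ms me).2.2) := by
  induction n generalizing cs i ml ms me st with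
  | zero =>
    have hcs : cs = [] := List.length_eq_zero_iff.mp (Nat.le_zero.mp hn)
    subst hcs
    simp [pvLoopA, pvLoopB]
  | succ n ih =>
    match cs with
    | [] => simp [pvLoopA, pvLoopB]
    | c :: rest =>
      by_cases hu : PySem.Chars.isupper c
      · rw [pvLoopA]
        simp only [hu, if_true]
        have hstep : (if (0:Int) + 1 > ml then pvLoopA rest (i+1) (0+1) i i (0+1) i
              else pvLoopA rest (i+1) ml ms me (0+1) i)
            = pvLoopA rest (i+1) (if (1:Int) > ml then 1 else ml)
                (if (1:Int) > ml then i else ms)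
                (if (1:Int) > ml then i + 1 - 1 else me) 1 i := by
          by_cases h : (1:Int) > ml
          · have h' : (0:Int) + 1 > ml := by omega
            simp only [h, h', if_true]
            norm_num
          · have h' : ¬ ((0:Int) + 1 > ml) := by omega
            simp only [h, h', if_false]
            norm_num
        rw [hstep]
        have hrun := pvLoopA_run rest (i+1) ml ms me 1 i (by omega) (by omega)
        rw [hrun]
        rw [pvLoopB]
        simp only [hu, if_true]
        set p := pvSkipRun rest (i+1) with hp
        have hple : p.1.length <= rest.length := pvSkipRun_length_le rest (i+1)
        match hq : p.1 with
        | [] =>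
          simp only [pvLoopA, pvLoopB]
          by_cases h : p.2 - i > ml
          · simp only [h, if_true]
          · simp only [h, if_false]
        | d :: rest' =>
          have hd : PySem.Chars.isupper d = false := pvSkipRun_head_not_upper rest (i+1) d rest' (by rw [← hp, hq])
          have hlen : rest'.length <= n := by
            have h5 : (d :: rest').length <= rest.length := hq ▸ hple
            simp only [List.length_cons] at h5 hn
            omega
          by_cases h : p.2 - i > ml
          · simp only [h, if_true]
            rw [pvLoopA, pvLoopB]
            simp only [hd, if_false, Bool.false_eq_true]
            exact ih rest' hlen (p.2+1) (p.2-i) i (p.2-1) i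
          · simp only [h, if_false]
            rw [pvLoopA, pvLoopB]
            simp only [hd, if_false, Bool.false_eq_true]
            exact ih rest' hlen (p.2+1) ml ms me i
      · rw [pvLoopA, pvLoopB]
        simp only [hu, if_false, Bool.false_eq_true]
        have hlen : rest.length <= n := by
          simp only [List.length_cons] at hn
          omega
        exact ih rest hlen (i+1) ml ms me st

-- ===== VERDICT (by name: the statement is the Claim_ definition above) =====
theorem max_uppercase_run_spec : Claim_equal_max_uppercase_run := by
  intro s _
  unfold Spec_max_uppercase_run max_uppercase_run max_uppercase_run_alt
  exact pvLoopA_eq_loopB s.toList.length s.toList le_rfl 0 0 0 0 0
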